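-- pv_equiv track=rewrite | github.com/pypi-data/pypi-mirror-318 | packages/pyafplus/pyafplus-1.1.7-py3-none-any.whl/listplus/__init__.py | split_at_indices
-- ===== SOURCE A (Python) =====
-- from typing import TypeVar, List, Callable, Any, Dict, Set, Tuple, Optional, Union
--
-- T = TypeVar('T')
--
-- def split_at_indices(lst: List[T], indices: List[int]) -> List[List[T]]:
--     """
--     在指定索引处拆分列表
--
--     参数:
--         lst: 输入列表
--         indices: 拆分位置的索引列表
--
--     返回:
--         拆分后的列表的列表
--
--     示例:
--         >>> split_at_indices([1, 2, 3, 4, 5], [2, 4])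
--         [[1, 2], [3, 4], [5]]
--     """
--     if not lst:
--         return []
--     if not indices:
--         return [lst]
--     result = []
--     start = 0
--     for index in sorted(set(indices)):
--         if index > start and index <= len(lst):
--             result.append(lst[start:index])
--             start = index
--     if start < len(lst):
--         result.append(lst[start:])
--     return result
-- ===== SOURCE B (Python) =====
-- def split_at_indices(lst, indices):
--     if not lst:
--         return []
--     cuts = {i for i in indices if 0 < i < len(lst)}
--     result = []
--     cur = []
--     for p, x in enumerate(lst):
--         if p in cuts:
--             result.append(cur)
--             cur = []
--         cur.append(x)
--     result.append(cur)
--     return result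
-- ===== Notes on version B (the rewrite author's own statement) =====
-- stated objective: alternative
-- what changed: Instead of iterating over the sorted deduplicated cut indices and slicing the list between consecutive cuts, B makes a single element-wise pass over the list with a position counter, flushing the current chunk whenever the position is in a precomputed set of valid cut points; no sorting and no slicing.
import Mathlib
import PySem

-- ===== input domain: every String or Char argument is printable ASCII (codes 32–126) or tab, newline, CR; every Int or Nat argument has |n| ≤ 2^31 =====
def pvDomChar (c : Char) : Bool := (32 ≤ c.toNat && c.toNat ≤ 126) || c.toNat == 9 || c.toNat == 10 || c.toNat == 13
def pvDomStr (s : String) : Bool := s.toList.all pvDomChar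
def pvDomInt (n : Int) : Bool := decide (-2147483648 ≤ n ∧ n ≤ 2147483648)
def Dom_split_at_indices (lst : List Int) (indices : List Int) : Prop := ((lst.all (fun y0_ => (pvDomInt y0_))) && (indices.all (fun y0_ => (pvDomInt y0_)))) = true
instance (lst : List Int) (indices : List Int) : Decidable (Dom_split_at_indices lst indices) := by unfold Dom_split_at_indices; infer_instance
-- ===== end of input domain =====

-- B replaces A's sort-the-cuts-then-slice loop by a single element-wise pass with a
-- position counter and a set-membership test at each position (no sorting, no slicing).

-- ===== PORT A =====
def split_at_indices (lst : List Int) (indices : List Int) : List (List Int) :=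
  if lst = [] then []
  else if indices = [] then [lst]
  else
    let st := (PySem.List.sorted (PySem.Set.ofList indices) (fun x => x) false).foldl
      (fun (acc : List (List Int) × Int) index =>
        if acc.2 < index ∧ index ≤ (lst.length : Int) then
          (acc.1 ++ [PySem.List.slice lst (some acc.2) (some index)], index)
        else acc) ([], 0)
    if st.2 < (lst.length : Int) then st.1 ++ [PySem.List.slice lst (some st.2) none] else st.1

-- ===== PORT B =====
def split_at_indices_alt (lst : List Int) (indices : List Int) : List (List Int) :=
  if lst = [] then []
  else
    let n : Int := lst.length
    let cuts : PySem.Set Int := PySem.Set.ofList (indices.filter (fun i => decide (0 < i ∧ i < n)))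
    let st := (PySem.List.enumerate lst).foldl
      (fun (acc : List (List Int) × List Int) px =>
        let acc' := if px.1 ∈ cuts then (acc.1 ++ [acc.2], ([] : List Int)) else acc
        (acc'.1, acc'.2 ++ [px.2])) ([], [])
    st.1 ++ [st.2]

-- ===== PRECONDITION & SPEC =====
def Spec_split_at_indices (lst : List Int) (indices : List Int) (out : List (List Int)) : Prop := out = split_at_indices_alt lst indices
instance (lst : List Int) (indices : List Int) (out : List (List Int)) : Decidable (Spec_split_at_indices lst indices out) := by unfold Spec_split_at_indices; infer_instance

-- ===== CLAIM (what is proved, stated in full; the proofs are below) =====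
def Claim_equal_split_at_indices : Prop := ∀ (lst : List Int) (indices : List Int), Dom_split_at_indices lst indices → Spec_split_at_indices lst indices (split_at_indices lst indices)

-- ===== LEMMAS AND PROOFS =====

/-- A's loop restructured as a recursion that carries the trailing append inside. -/
def tailSegs (lst : List Int) (n : Int) : Int → List Int → List (List Int)
  | start, [] => if start < n then [PySem.List.slice lst (some start) none] else []
  | start, i :: rest =>
      if start < i ∧ i ≤ n then PySem.List.slice lst (some start) (some i) :: tailSegs lst n i rest
      else tailSegs lst n start rest

/-- The segments of lst between consecutive cuts of `p :: v`, the last one running to the end. -/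
def segs (lst : List Int) : Int → List Int → List (List Int)
  | p, [] => [PySem.List.slice lst (some p) (some (lst.length : Int))]
  | p, c :: cs => PySem.List.slice lst (some p) (some c) :: segs lst c cs

/-- B's element scan as a recursion on the remaining list, carrying the final flush inside. -/
def scanBgo (C : List Int) : Int → List Int → List Int → List (List Int)
  | _, cur, [] => [cur]
  | p, cur, x :: rest =>
      if p ∈ C then cur :: scanBgo C (p+1) [x] rest
      else scanBgo C (p+1) (cur ++ [x]) rest

lemma loopA_eq_tailSegs (lst : List Int) (n : Int) (s : List Int) :
    ∀ (result : List (List Int)) (start : Int),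
      (if (s.foldl (fun (acc : List (List Int) × Int) index =>
            if acc.2 < index ∧ index ≤ n then
              (acc.1 ++ [PySem.List.slice lst (some acc.2) (some index)], index)
            else acc) (result, start)).2 < n then
        (s.foldl (fun (acc : List (List Int) × Int) index =>
            if acc.2 < index ∧ index ≤ n then
              (acc.1 ++ [PySem.List.slice lst (some acc.2) (some index)], index)
            else acc) (result, start)).1 ++ [PySem.List.slice lst (some (s.foldl (fun (acc : List (List Int) × Int) index =>
            if acc.2 < index ∧ index ≤ n then
              (acc.1 ++ [PySem.List.slice lst (some acc.2) (some index)], index)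
            else acc) (result, start)).2) none]
      else (s.foldl (fun (acc : List (List Int) × Int) index =>
            if acc.2 < index ∧ index ≤ n then
              (acc.1 ++ [PySem.List.slice lst (some acc.2) (some index)], index)
            else acc) (result, start)).1)
      = result ++ tailSegs lst n start s := by
  induction s with
  | nil =>
      intro result start
      simp only [List.foldl_nil, tailSegs]
      split_ifs <;> simp
  | cons i rest ih =>
      intro result start
      simp only [List.foldl_cons, tailSegs]
      by_cases h : start < i ∧ i ≤ n
      · rw [if_pos h, if_pos h, ih]
        simp
      · rw [if_neg h, if_neg h]
        exact ih result start

/-- skipping non-positive / too-large indices in the running loop is filtering them up front -/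
lemma tailSegs_filter (lst : List Int) (n : Int) :
    ∀ (s : List Int) (start : Int), 0 ≤ start → s.Pairwise (· < ·) →
      (∀ i ∈ s, start < i ∨ i ≤ 0) →
      tailSegs lst n start s
        = tailSegs lst n start (s.filter (fun i => decide (0 < i ∧ i ≤ n))) := by
  intro s
  induction s with
  | nil => intro start _ _ _; rfl
  | cons i rest ih =>
      intro start h0 hp hall
      have hp' := (List.pairwise_cons.mp hp).2
      have hi := (List.pairwise_cons.mp hp).1
      by_cases hk : 0 < i ∧ i ≤ n
      · have hsi : start < i := by rcases hall i (by simp) with h | h <;> omega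
        rw [show (i :: rest).filter (fun j => decide (0 < j ∧ j ≤ n))
              = i :: rest.filter (fun j => decide (0 < j ∧ j ≤ n)) from by
            rw [List.filter_cons, if_pos (decide_eq_true hk)]]
        simp only [tailSegs]
        rw [if_pos (And.intro hsi hk.2), if_pos (And.intro hsi hk.2),
          ih i (by omega) hp' (fun j hj => Or.inl (hi j hj))]
      · have hsn : ¬ (start < i ∧ i ≤ n) := by omega
        rw [show (i :: rest).filter (fun j => decide (0 < j ∧ j ≤ n))
              = rest.filter (fun j => decide (0 < j ∧ j ≤ n)) from by
            rw [List.filter_cons, if_neg (by simpa using hk)]]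
        simp only [tailSegs]
        rw [if_neg hsn]
        exact ih start h0 hp' (fun j hj => hall j (by simp [hj]))

lemma slice_from_eq_slice_len (lst : List Int) (start : Int) (h0 : 0 ≤ start) :
    PySem.List.slice lst (some start) none
      = PySem.List.slice lst (some start) (some (lst.length : Int)) := by
  rw [PySem.List.slice_from lst h0, PySem.List.slice_toNat lst h0 (by positivity)]
  simp only [Int.toNat_natCast]
  rw [List.take_of_length_le (by simp)]

/-- slice to the full length is a drop -/
lemma slice_full (lst : List Int) (p : Int) (h0 : 0 ≤ p) :
    PySem.List.slice lst (some p) (some (lst.length : Int)) = lst.drop p.toNat := by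
  rw [PySem.List.slice_toNat lst h0 (by positivity)]
  simp only [Int.toNat_natCast]
  exact List.take_of_length_le (by simp)

/-- peeling one element off the front of a slice -/
lemma slice_cons_step (lst : List Int) (p c x : Int) (rest : List Int)
    (h0 : 0 ≤ p) (hd : lst.drop p.toNat = (x : Int) :: rest) (hc : p < c) :
    PySem.List.slice lst (some p) (some c)
      = x :: PySem.List.slice lst (some (p+1)) (some c) := by
  have hdrop : lst.drop (p+1).toNat = rest := by
    rw [show (p+1).toNat = p.toNat + 1 from by omega, ← List.tail_drop, hd]
    rfl
  rw [PySem.List.slice_toNat lst h0 (by omega), PySem.List.slice_toNat lst (by omega) (by omega),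
    hd, hdrop, show c.toNat - p.toNat = (c.toNat - (p+1).toNat) + 1 from by omega,
    List.take_succ_cons]

/-- tailSegs on cuts in (start, n] is segs on the cuts below n (a cut at n just ends the list). -/
lemma tailSegs_eq_segs (lst : List Int) :
    ∀ (w : List Int) (start : Int), 0 ≤ start → start < (lst.length : Int) →
      w.Pairwise (· < ·) → (∀ c ∈ w, start < c ∧ c ≤ (lst.length : Int)) →
      tailSegs lst (lst.length : Int) start w
        = segs lst start (w.filter (fun c => decide (c < (lst.length : Int)))) := by
  intro w
  induction w with
  | nil =>
      intro start h0 hn _ _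
      simp only [tailSegs, if_pos hn, List.filter_nil, segs]
      rw [slice_from_eq_slice_len lst start h0]
  | cons c cs ih =>
      intro start h0 hn hp hall
      have hc := hall c (by simp)
      simp only [tailSegs, if_pos (And.intro hc.1 hc.2)]
      by_cases hlt : c < (lst.length : Int)
      · rw [show (c :: cs).filter (fun j => decide (j < (lst.length : Int)))
              = c :: cs.filter (fun j => decide (j < (lst.length : Int))) from by
            rw [List.filter_cons, if_pos (by simpa using hlt)]]
        simp only [segs]
        rw [ih c (by omega) hlt (List.pairwise_cons.mp hp).2
          (fun j hj => ⟨(List.pairwise_cons.mp hp).1 j hj, (hall j (by simp [hj])).2⟩)]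
      · have hceq : c = (lst.length : Int) := by omega
        have hcs : cs = [] := by
          cases cs with
          | nil => rfl
          | cons d ds =>
              have h1 := (List.pairwise_cons.mp hp).1 d (by simp)
              have h2 := (hall d (by simp)).2
              omega
        subst hcs
        rw [show (c :: ([] : List Int)).filter (fun j => decide (j < (lst.length : Int)))
              = [] from by rw [List.filter_cons, if_neg (by simpa using hlt)]; rfl]
        simp only [tailSegs, segs, hceq]
        rw [if_neg (by omega)]

/-- B's foldl over the enumerated list, with the final flush, is scanBgo. -/
lemma foldl_eq_scanBgo (C : List Int) :
    ∀ (l : List Int) (p : Int) (result : List (List Int)) (cur : List Int),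
      ((PySem.List.enumerate l p).foldl
        (fun (acc : List (List Int) × List Int) px =>
          let acc' := if px.1 ∈ C then (acc.1 ++ [acc.2], ([] : List Int)) else acc
          (acc'.1, acc'.2 ++ [px.2])) (result, cur)).1
      ++ [((PySem.List.enumerate l p).foldl
        (fun (acc : List (List Int) × List Int) px =>
          let acc' := if px.1 ∈ C then (acc.1 ++ [acc.2], ([] : List Int)) else acc
          (acc'.1, acc'.2 ++ [px.2])) (result, cur)).2]
      = result ++ scanBgo C p cur l := by
  intro l
  induction l with
  | nil => intro p result cur; simp [PySem.List.enumerate_nil, scanBgo]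
  | cons x rest ih =>
      intro p result cur
      rw [PySem.List.enumerate_cons, List.foldl_cons]
      dsimp only
      by_cases h : p ∈ C
      · simp only [if_pos h]
        rw [ih]
        simp [scanBgo, if_pos h]
      · simp only [if_neg h]
        rw [ih]
        simp [scanBgo, if_neg h]

/-- The element scan with cut set C produces exactly the segments between the sorted cuts v,
    provided C and v agree on every position still to be scanned. -/
lemma scan_main (lst : List Int) (C : List Int) :
    ∀ (l : List Int) (p : Int) (cur : List Int) (v : List Int),
      0 ≤ p → lst.drop p.toNat = l →
      v.Pairwise (· < ·) →
      (∀ c ∈ v, p ≤ c ∧ c < (lst.length : Int)) →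
      (∀ c : Int, p ≤ c → c < (lst.length : Int) → (c ∈ C ↔ c ∈ v)) →
      scanBgo C p cur l = (segs lst p v).modifyHead (fun s => cur ++ s) := by
  intro l
  induction l with
  | nil =>
      intro p cur v h0 hdrop hp hall _
      have hlen : (lst.length : Int) ≤ p := by
        have := congrArg List.length hdrop
        simp only [List.length_drop, List.length_nil] at this
        omega
      have hv : v = [] := by
        cases v with
        | nil => rfl
        | cons c cs => have := hall c (by simp); omega
      subst hv
      simp only [segs, List.modifyHead, scanBgo]
      rw [slice_full lst p h0, hdrop, List.append_nil]
  | cons x rest ih =>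
      intro p cur v h0 hdrop hp hall hmem
      have hplen : p < (lst.length : Int) := by
        have := congrArg List.length hdrop
        simp only [List.length_drop, List.length_cons] at this
        omega
      have hdrop' : lst.drop (p+1).toNat = rest := by
        rw [show (p+1).toNat = p.toNat + 1 from by omega, ← List.tail_drop, hdrop]
        rfl
      simp only [scanBgo]
      by_cases hpc : p ∈ C
      · -- position p is a cut: v must start with p
        have hpv : p ∈ v := (hmem p le_rfl hplen).mp hpc
        obtain ⟨cs, rfl⟩ : ∃ cs, v = p :: cs := by
          cases v with
          | nil => simp at hpv
          | cons c cs =>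
              rcases List.mem_cons.mp hpv with h | h
              · exact ⟨cs, by rw [h]⟩
              · have h1 := (List.pairwise_cons.mp hp).1 p h
                have h2 := (hall c (by simp)).1
                omega
        rw [if_pos hpc]
        have hcs_gt : ∀ c ∈ cs, p + 1 ≤ c ∧ c < (lst.length : Int) := by
          intro c hc
          have h1 := (List.pairwise_cons.mp hp).1 c hc
          have h2 := (hall c (by simp [hc])).2
          omega
        rw [ih (p+1) [x] cs (by omega) hdrop' (List.pairwise_cons.mp hp).2 hcs_gt
          (fun c hc1 hc2 => by
            rw [hmem c (by omega) hc2, List.mem_cons]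
            constructor
            · rintro (h | h)
              · omega
              · exact h
            · exact Or.inr)]
        -- cur :: modifyHead ([x] ++ ·) (segs (p+1) cs) = modifyHead (cur ++ ·) (segs p (p::cs))
        simp only [segs]
        cases cs with
        | nil =>
            simp only [segs, List.modifyHead]
            rw [slice_cons_step lst p (lst.length : Int) x rest h0 hdrop hplen,
              PySem.List.slice_toNat lst h0 h0]
            simp [List.take_zero]
        | cons c cs' =>
            have hc1 : p < c := by
              have := (hcs_gt c (by simp)).1; omega
            simp only [segs, List.modifyHead]
            rw [slice_cons_step lst p c x rest h0 hdrop hc1,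
              PySem.List.slice_toNat lst h0 h0]
            simp [List.take_zero]
      · -- position p is not a cut
        have hpv : p ∉ v := fun h => hpc ((hmem p le_rfl hplen).mpr h)
        have hv_gt : ∀ c ∈ v, p + 1 ≤ c ∧ c < (lst.length : Int) := by
          intro c hc
          have h1 := (hall c hc).1
          have h2 : c ≠ p := fun h => hpv (h ▸ hc)
          exact ⟨by omega, (hall c hc).2⟩
        rw [if_neg hpc]
        rw [ih (p+1) (cur ++ [x]) v (by omega) hdrop' hp hv_gt
          (fun c hc1 hc2 => hmem c (by omega) hc2)]
        cases v with
        | nil =>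
            simp only [segs, List.modifyHead]
            rw [slice_cons_step lst p (lst.length : Int) x rest h0 hdrop hplen]
            simp
        | cons c cs =>
            have hc1 : p < c := by have := (hv_gt c (by simp)).1; omega
            simp only [segs, List.modifyHead]
            rw [slice_cons_step lst p c x rest h0 hdrop hc1]
            simp

-- ===== VERDICT (by name: the statement is the Claim_ definition above) =====
theorem split_at_indices_spec : Claim_equal_split_at_indices := by
  intro lst indices _
  unfold Spec_split_at_indices split_at_indices split_at_indices_alt
  by_cases hl : lst = []
  · simp [hl]
  · rw [if_neg hl, if_neg hl]
    have hn : (0 : Int) < (lst.length : Int) := by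
      have : lst.length ≠ 0 := fun h => hl (List.eq_nil_of_length_eq_zero h)
      omega
    -- the common cut list
    set v : List Int := (PySem.List.sorted (PySem.Set.ofList indices) (fun x => x) false).filter
      (fun c => decide (0 < c ∧ c < (lst.length : Int))) with hv
    have hvp : v.Pairwise (· < ·) :=
      (PySem.List.sorted_ofList_pairwise_lt (κ := Int) indices).filter _
    have hvb : ∀ c ∈ v, (0:Int) ≤ c ∧ c < (lst.length : Int) := by
      intro c hc
      have := List.of_mem_filter hc
      simp only [decide_eq_true_eq] at this
      omega
    have hvm : ∀ c : Int, (0:Int) ≤ c → c < (lst.length : Int) →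
        (c ∈ indices.filter (fun i => decide (0 < i ∧ i < (lst.length : Int))) ↔ c ∈ v) := by
      intro c _ hc2
      rw [hv, List.mem_filter, List.mem_filter, PySem.List.mem_sorted, PySem.Set.mem_ofList]
    -- B side
    have hB : ((PySem.List.enumerate lst 0).foldl
        (fun (acc : List (List Int) × List Int) px =>
          let acc' := if px.1 ∈ PySem.Set.ofList (indices.filter (fun i => decide (0 < i ∧ i < (lst.length : Int)))) then (acc.1 ++ [acc.2], ([] : List Int)) else acc
          (acc'.1, acc'.2 ++ [px.2])) ([], [])).1
        ++ [((PySem.List.enumerate lst 0).foldl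
        (fun (acc : List (List Int) × List Int) px =>
          let acc' := if px.1 ∈ PySem.Set.ofList (indices.filter (fun i => decide (0 < i ∧ i < (lst.length : Int)))) then (acc.1 ++ [acc.2], ([] : List Int)) else acc
          (acc'.1, acc'.2 ++ [px.2])) ([], [])).2]
        = segs lst 0 v := by
      rw [foldl_eq_scanBgo, List.nil_append,
        scan_main lst _ lst 0 [] v le_rfl (by simp) hvp
          (fun c hc => (hvb c hc))
          (fun c hc1 hc2 => by
            rw [PySem.Set.mem_ofList]
            exact hvm c hc1 hc2)]
      cases v <;> simp [segs, List.modifyHead]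
    by_cases hi : indices = []
    · subst hi
      rw [if_pos rfl]
      have hv0 : v = [] := by rw [hv]; rfl
      simp only at hB
      rw [hB, hv0]
      simp only [segs]
      rw [PySem.List.slice_zero_start, PySem.List.slice_to lst (by positivity)]
      simp
    · rw [if_neg hi]
      rw [loopA_eq_tailSegs lst (lst.length : Int)
        (PySem.List.sorted (PySem.Set.ofList indices) (fun x => x) false) [] 0, List.nil_append]
      rw [tailSegs_filter lst (lst.length : Int) _ 0 le_rfl
        (PySem.List.sorted_ofList_pairwise_lt (κ := Int) indices) (fun i _ => by omega)]
      rw [tailSegs_eq_segs lst _ 0 le_rfl hn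
        ((PySem.List.sorted_ofList_pairwise_lt (κ := Int) indices).filter _)
        (fun j hj => by
          have := List.of_mem_filter hj
          simp only [decide_eq_true_eq] at this
          exact this)]
      rw [List.filter_filter]
      have hfe : ((PySem.List.sorted (PySem.Set.ofList indices) (fun x => x) false).filter
          (fun a => decide (a < (lst.length : Int)) && decide (0 < a ∧ a ≤ (lst.length : Int)))) = v := by
        rw [hv]
        apply List.filter_congr
        intro a _
        rw [Bool.eq_iff_iff]
        simp only [Bool.and_eq_true, decide_eq_true_eq]
        omega
      rw [hfe]
      rw [hB]
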